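-- pv_equiv track=rewrite | github.com/sm0514sm/TIL | Algorithm/src/Python/3. 프로그래머스/Level_2/124 나라의 숫자.py | find
-- ===== SOURCE A (Python) =====
-- def find(start, n, end):
--     div = (end - start + 1) // 3
--     if div == 1:
--         if start == n:
--             return "1"
--         elif start + 1 == n:
--             return "2"
--         elif start + 2 == n:
--             return "4"
--     if start <= n <= start + div - 1:
--         return "1" + find(start, n, start + div - 1)
--     elif start + div <= n <= start + div * 2 - 1:
--         return "2" + find(start + div, n, start + div * 2 - 1)
--     elif start + div * 2 <= n <= end:
--         return "4" + find(start + div * 2, n, end)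
-- ===== SOURCE B (Python) =====
-- def find(start, n, end):
--     if n < start or n > end:
--         return None
--     p = n - start
--     size = end - start + 1
--     s = ""
--     while size > 1:
--         s = "124"[p % 3] + s
--         p //= 3
--         size //= 3
--     return s
-- ===== Notes on version B (the rewrite author's own statement) =====
-- stated objective: alternative
-- what changed: Replaces A's top-down recursion that splits the window into thirds and prepends the most significant digit with a closed-form positional computation: B extracts the digits of n-start in base 3 least-significant-first with % and //, mapping 0/1/2 to '1'/'2'/'4' and building the string back-to-front, with no window recursion at all.
-- outside the precondition, e.g. on find(1, 4, 5): A returns '42', B returns '1'; on find(0, 0, 0): A raises RecursionError, B returns ''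
import Mathlib
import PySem

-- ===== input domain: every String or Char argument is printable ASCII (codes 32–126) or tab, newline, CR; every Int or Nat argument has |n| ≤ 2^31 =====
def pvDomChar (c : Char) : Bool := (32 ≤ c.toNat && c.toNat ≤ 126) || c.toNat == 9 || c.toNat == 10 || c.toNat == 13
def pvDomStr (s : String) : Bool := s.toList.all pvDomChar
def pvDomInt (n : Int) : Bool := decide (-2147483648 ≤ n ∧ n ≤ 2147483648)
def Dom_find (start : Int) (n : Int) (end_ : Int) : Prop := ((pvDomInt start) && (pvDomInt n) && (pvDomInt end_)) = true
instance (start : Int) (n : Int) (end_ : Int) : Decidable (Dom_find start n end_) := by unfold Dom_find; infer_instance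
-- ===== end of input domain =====

-- B replaces A's window-splitting recursion by base-3 digit extraction (LSB-first, built back-to-front); equal on Pre_.


-- ===== PORT A =====
-- fuel only makes the recursion total; on Pre_ inputs it is never exhausted.
-- Python's `"1" + find(...)` raises TypeError when the inner call gives None; here `.map` yields
-- none instead — inside Pre_ the inner call always returns a string, so this is exact on Pre_.
def findGo : Nat → Int → Int → Int → Option String
  | 0, _, _, _ => none
  | f + 1, start, n, end_ =>
    let div := PySem.Int.floordiv (end_ - start + 1) 3
    let rest : Unit → Option String := fun _ =>
      if start ≤ n ∧ n ≤ start + div - 1 then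
        (findGo f start n (start + div - 1)).map (fun s => "1" ++ s)
      else if start + div ≤ n ∧ n ≤ start + div * 2 - 1 then
        (findGo f (start + div) n (start + div * 2 - 1)).map (fun s => "2" ++ s)
      else if start + div * 2 ≤ n ∧ n ≤ end_ then
        (findGo f (start + div * 2) n end_).map (fun s => "4" ++ s)
      else none
    if div = 1 then
      if start = n then some "1"
      else if start + 1 = n then some "2"
      else if start + 2 = n then some "4"
      else rest ()
    else rest ()

def find (start : Int) (n : Int) (end_ : Int) : Option String :=
  findGo ((end_ - start).natAbs + 1) start n end_

-- ===== PORT B =====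
-- the while-loop of Source B: prepend "124"[p % 3], then p //= 3, size //= 3; terminates because
-- size strictly shrinks.  "124"[p % 3] always succeeds in Python (0 ≤ p % 3 < 3), so .getD is
-- never the default there.
def findAltLoop (p : Int) (size : Int) (s : String) : String :=
  if 1 < size then
    findAltLoop (PySem.Int.floordiv p 3) (PySem.Int.floordiv size 3)
      (String.singleton ((PySem.Str.pyGet? "124" (PySem.Int.mod p 3)).getD '?') ++ s)
  else s
termination_by size.toNat
decreasing_by
  rw [PySem.Int.floordiv_eq_ediv_of_pos (by norm_num)]
  omega

def find_alt (start : Int) (n : Int) (end_ : Int) : Option String :=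
  if start ≤ n ∧ n ≤ end_ then
    some (findAltLoop (n - start) (end_ - start + 1) "")
  else none

-- ===== PRECONDITION & SPEC =====
-- `isPow3 m` : m is a power of three (helper used only to state Pre_): divide by 3 while
-- divisible; the fuel m is never exhausted since at most log₃ m steps are taken.
def isPow3Go : Nat → Nat → Bool
  | 0, _ => false
  | f + 1, m =>
    if m == 1 then true
    else if m == 0 || m % 3 != 0 then false
    else isPow3Go f (m / 3)

def isPow3 (m : Nat) : Bool := isPow3Go m m

-- Pre_ excludes in-window inputs whose window length is not a power of 3 of at least 3 (and the
-- lone out-of-window corner n = end_ = start - 2): there A's recursion raises RecursionError for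
-- most positions, and the digit strings it does return (e.g. (1,4,5) → "42") are accidents of
-- floor division outside the 124-problem's power-of-three domain.
def Pre_find (start : Int) (n : Int) (end_ : Int) : Prop :=
  ((n < start ∨ end_ < n) ∧ ¬(n = start - 2 ∧ end_ = start - 2)) ∨
  (start ≤ n ∧ n ≤ end_ ∧ 3 ≤ end_ - start + 1 ∧ isPow3 (end_ - start + 1).toNat = true)
instance (start : Int) (n : Int) (end_ : Int) : Decidable (Pre_find start n end_) := by
  unfold Pre_find; infer_instance

def pvWitness_find : Int × Int × Int := (1, 5, 9)

def Spec_find (start : Int) (n : Int) (end_ : Int) (out : Option String) : Prop := out = find_alt start n end_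
instance (start : Int) (n : Int) (end_ : Int) (out : Option String) : Decidable (Spec_find start n end_ out) := by unfold Spec_find; infer_instance

-- ===== CLAIM (what is proved, stated in full; the proofs are below) =====
def Claim_equal_find : Prop := ∀ (start : Int) (n : Int) (end_ : Int), Dom_find start n end_ → Pre_find start n end_ → Spec_find start n end_ (find start n end_)

-- ===== LEMMAS AND PROOFS =====

-- reference digit string: the k base-3 digits of p, mapped 0/1/2 ↦ "1"/"2"/"4"
def digitStr (r : Nat) : String := if r = 0 then "1" else if r = 1 then "2" else "4"

def digits : Nat → Nat → String
  | 0, _ => ""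
  | k + 1, p => digits k (p / 3) ++ digitStr (p % 3)

theorem isPow3Go_spec : ∀ (f m : Nat), isPow3Go f m = true → ∃ k, m = 3 ^ k := by
  intro f
  induction f with
  | zero => intro m h; simp [isPow3Go] at h
  | succ f ih =>
    intro m h
    rw [isPow3Go] at h
    split at h
    · next h1 => exact ⟨0, by simpa using h1⟩
    · split at h
      · exact absurd h (by simp)
      · next h1 h2 =>
        obtain ⟨k, hk⟩ := ih (m / 3) h
        have h3 : m ≠ 0 ∧ m % 3 = 0 := by simpa using h2
        have hp : 3 ^ (k + 1) = 3 * 3 ^ k := by ring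
        exact ⟨k + 1, by omega⟩

theorem isPow3_spec : ∀ m, isPow3 m = true → ∃ k, m = 3 ^ k :=
  fun m h => isPow3Go_spec m m h

-- MSB view of digits
theorem digits_msb : ∀ (k p : Nat), p < 3 ^ (k + 1) →
    digits (k + 1) p = digitStr (p / 3 ^ k) ++ digits k (p % 3 ^ k) := by
  intro k
  induction k with
  | zero =>
    intro p hp
    simp only [digits, pow_zero, Nat.div_one]
    have : p % 3 = p := Nat.mod_eq_of_lt (by simpa using hp)
    rw [this]
    simp [String.append_empty, String.empty_append]
  | succ k ih =>
    intro p hp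
    have h1 : p / 3 < 3 ^ (k + 1) := by
      have : 3 ^ (k + 1 + 1) = 3 * 3 ^ (k + 1) := by ring
      omega
    have e1 : p / 3 / 3 ^ k = p / 3 ^ (k + 1) := by
      rw [Nat.div_div_eq_div_mul, ← pow_succ']
    have e2 : p % 3 ^ (k + 1) % 3 = p % 3 := by
      exact Nat.mod_mod_of_dvd p ⟨3 ^ k, by ring⟩
    have e3 : p / 3 % 3 ^ k = p % 3 ^ (k + 1) / 3 := by
      have : p % 3 ^ (k + 1) = p % (3 * 3 ^ k) := by rw [← pow_succ']
      rw [this, Nat.mod_mul_right_div_self]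
    calc digits (k + 2) p = digits (k + 1) (p / 3) ++ digitStr (p % 3) := rfl
      _ = digitStr (p / 3 / 3 ^ k) ++ digits k (p / 3 % 3 ^ k) ++ digitStr (p % 3) := by
          rw [ih _ h1]
      _ = digitStr (p / 3 ^ (k + 1)) ++ (digits k (p % 3 ^ (k + 1) / 3) ++ digitStr (p % 3 ^ (k + 1) % 3)) := by
          rw [e1, e2, e3, String.append_assoc]
      _ = _ := rfl

-- out of window (and not the diverging corner): A gives none
theorem findGo_none (f : Nat) (start n end_ : Int)
    (h : (n < start ∨ end_ < n) ∧ ¬(n = start - 2 ∧ end_ = start - 2)) :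
    findGo (f + 1) start n end_ = none := by
  have h3 : (0:Int) < 3 := by norm_num
  show (let div := PySem.Int.floordiv (end_ - start + 1) 3; _ : Option String) = none
  rw [PySem.Int.floordiv_eq_ediv_of_pos h3]
  simp only [findGo]
  rw [PySem.Int.floordiv_eq_ediv_of_pos h3]
  split_ifs <;> first | rfl | omega

-- A on a 3^k window computes the digit string
theorem findA_eq : ∀ (k : Nat), 1 ≤ k → ∀ (f : Nat), k ≤ f → ∀ (start : Int) (p : Nat),
    p < 3 ^ k → findGo f start (start + p) (start + (3:Int) ^ k - 1) = some (digits k p) := by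
  intro k hk
  induction k, hk using Nat.le_induction with
  | base =>
    intro f hf start p hp
    obtain ⟨f', rfl⟩ : ∃ f', f = f' + 1 := ⟨f - 1, by omega⟩
    have e : start + (3:Int) ^ 1 - 1 = start + 2 := by rw [pow_one]; ring
    rw [e]
    interval_cases p
    · simp [findGo, digits, digitStr]
    · have e1 : start + ((1:Nat):Int) = start + 1 := by norm_num
      rw [e1]; simp [findGo, digits, digitStr]
    · have e2 : start + ((2:Nat):Int) = start + 2 := by norm_num
      rw [e2]; simp [findGo, digits, digitStr]
  | succ k hk ih =>
    intro f hf start p hp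
    obtain ⟨f', rfl⟩ : ∃ f', f = f' + 1 := ⟨f - 1, by omega⟩
    have hf' : k ≤ f' := by omega
    have hcast : ∀ j : Nat, (((3 ^ j : Nat)) : Int) = (3:Int) ^ j := by
      intro j; push_cast; ring
    have hpow : (3:Int) ^ (k + 1) = 3 * 3 ^ k := by ring
    have hpowN : 3 ^ (k + 1) = 3 * 3 ^ k := by ring
    have hpos : (3:Int) ≤ 3 ^ k := by
      calc (3:Int) = 3 ^ 1 := by norm_num
      _ ≤ 3 ^ k := by apply pow_le_pow_right₀ <;> omega
    have hdiv : PySem.Int.floordiv (start + 3 ^ (k+1) - 1 - start + 1) 3 = (3:Int) ^ k := by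
      rw [PySem.Int.floordiv_eq_ediv_of_pos (by norm_num)]
      have e : start + (3:Int) ^ (k+1) - 1 - start + 1 = 3 ^ k * 3 := by rw [hpow]; ring
      rw [e, Int.mul_ediv_cancel _ (by norm_num)]
    have hne : ¬ ((3:Int) ^ k = 1) := by omega
    have hpInt : ((p:Int)) < 3 ^ (k + 1) := by
      have := hcast (k + 1); omega
    rcases (by have := hcast k; omega :
        (p:Int) < 3 ^ k ∨ ((3:Int) ^ k ≤ p ∧ (p:Int) < 3 ^ k * 2) ∨ (3:Int) ^ k * 2 ≤ p) with
      h | h | h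
    · -- first third, digit "1"
      have hpN : p < 3 ^ k := by have := hcast k; omega
      have hmsb : digits (k + 1) p = "1" ++ digits k p := by
        rw [digits_msb k p (by omega)]
        rw [Nat.div_eq_of_lt hpN, Nat.mod_eq_of_lt hpN]; rfl
      have hsub : start + (3:Int) ^ k - 1 = start + 3 ^ k - 1 := rfl
      simp only [findGo, hdiv]
      rw [if_neg hne, if_pos ⟨by omega, by omega⟩, ih f' hf' start p hpN]
      rw [hmsb]; rfl
    · -- middle third, digit "2"
      have hleN : 3 ^ k ≤ p := by have := hcast k; omega
      have hpN : p - 3 ^ k < 3 ^ k := by have := hcast k; omega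
      have hs : start + (3:Int) ^ k + ((p - 3 ^ k : Nat) : Int) = start + p := by
        have := hcast k; push_cast [Nat.cast_sub hleN]; omega
      have hIH := ih f' hf' (start + 3 ^ k) (p - 3 ^ k) hpN
      rw [hs] at hIH
      have he : start + (3:Int) ^ k + 3 ^ k - 1 = start + 3 ^ k * 2 - 1 := by ring
      rw [he] at hIH
      have hmsb : digits (k + 1) p = "2" ++ digits k (p - 3 ^ k) := by
        rw [digits_msb k p (by omega)]
        have hd : p / 3 ^ k = 1 := by
          have h2 : p < 2 * 3 ^ k := by have := hcast k; omega
          exact Nat.div_eq_of_lt_le (by omega) (by omega)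
        have hm : p % 3 ^ k = p - 3 ^ k := by
          rw [Nat.mod_eq_sub_mod hleN, Nat.mod_eq_of_lt hpN]
        rw [hd, hm]; rfl
      simp only [findGo, hdiv]
      rw [if_neg hne, if_neg (by omega), if_pos ⟨by omega, by omega⟩, hIH]
      rw [hmsb]; rfl
    · -- last third, digit "4"
      have hleN : 2 * 3 ^ k ≤ p := by have := hcast k; omega
      have hpN : p - 2 * 3 ^ k < 3 ^ k := by have := hcast k; omega
      have hs : start + (3:Int) ^ k * 2 + ((p - 2 * 3 ^ k : Nat) : Int) = start + p := by
        have := hcast k; push_cast [Nat.cast_sub hleN]; omega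
      have hIH := ih f' hf' (start + 3 ^ k * 2) (p - 2 * 3 ^ k) hpN
      rw [hs] at hIH
      have he : start + (3:Int) ^ k * 2 + 3 ^ k - 1 = start + 3 ^ (k + 1) - 1 := by
        rw [hpow]; ring
      rw [he] at hIH
      have hmsb : digits (k + 1) p = "4" ++ digits k (p - 2 * 3 ^ k) := by
        rw [digits_msb k p (by omega)]
        have hd : p / 3 ^ k = 2 := Nat.div_eq_of_lt_le (by omega) (by omega)
        have hm : p % 3 ^ k = p - 2 * 3 ^ k := by
          rw [Nat.mod_eq_sub_mod (by omega), Nat.mod_eq_sub_mod (by omega),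
            Nat.mod_eq_of_lt (by omega)]
          omega
        rw [hd, hm]; rfl
      simp only [findGo, hdiv]
      rw [if_neg hne, if_neg (by omega), if_neg (by omega), if_pos ⟨by omega, by omega⟩, hIH]
      rw [hmsb]; rfl

theorem char124 (r : Nat) (h : r < 3) :
    String.singleton ((PySem.Str.pyGet? "124" ((r:Nat):Int)).getD '?') = digitStr r := by
  interval_cases r <;> decide

-- B's loop on a 3^k window computes the digit string (built back-to-front)
theorem findB_eq : ∀ (k p : Nat) (s : String), p < 3 ^ k →
    findAltLoop ((p:Nat):Int) ((3:Int) ^ k) s = digits k p ++ s := by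
  intro k
  induction k with
  | zero =>
    intro p s _
    rw [findAltLoop]
    norm_num [digits, String.empty_append]
  | succ k ih =>
    intro p s hp
    have hpowN : 3 ^ (k + 1) = 3 * 3 ^ k := by ring
    have hposN : 0 < 3 ^ k := by positivity
    have hpow : (3:Int) ^ (k + 1) = 3 ^ k * 3 := by ring
    have hposI : (0:Int) < 3 ^ k := by positivity
    rw [findAltLoop, if_pos (by omega)]
    have e1 : PySem.Int.floordiv ((p:Nat):Int) 3 = (((p / 3 : Nat)):Int) := by
      exact_mod_cast PySem.Int.floordiv_natCast p 3
    have e2 : PySem.Int.floordiv ((3:Int) ^ (k + 1)) 3 = (3:Int) ^ k := by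
      rw [PySem.Int.floordiv_eq_ediv_of_pos (by norm_num), hpow,
        Int.mul_ediv_cancel _ (by norm_num)]
    have e3 : PySem.Int.mod ((p:Nat):Int) 3 = (((p % 3 : Nat)):Int) := by
      exact_mod_cast PySem.Int.mod_natCast p 3
    rw [e1, e2, e3, char124 (p % 3) (by omega)]
    rw [ih (p / 3) _ (by omega)]
    show digits k (p / 3) ++ (digitStr (p % 3) ++ s) = digits (k + 1) p ++ s
    rw [← String.append_assoc]; rfl

-- ===== VERDICT (by name: the statement is the Claim_ definition above) =====
theorem find_spec : Claim_equal_find := by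
  intro start n end_ _ hpre
  unfold Spec_find find find_alt
  rcases hpre with h | ⟨h1, h2, h3, hP⟩
  · obtain ⟨f, hf⟩ : ∃ f, (end_ - start).natAbs + 1 = f + 1 := ⟨_, rfl⟩
    rw [hf, findGo_none _ _ _ _ h, if_neg (by omega)]
  · obtain ⟨k, hk⟩ := isPow3_spec _ hP
    have hcast : ((3 ^ k : Nat) : Int) = (3:Int) ^ k := by push_cast; ring
    have hlen : end_ - start + 1 = (3:Int) ^ k := by omega
    have hk1 : 1 ≤ k := by
      by_contra hc
      have : k = 0 := by omega
      subst this; simp at hcast; omega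
    set p : Nat := (n - start).toNat with hp
    have hn : n = start + (p:Int) := by omega
    have hend : end_ = start + (3:Int) ^ k - 1 := by omega
    have hpN : p < 3 ^ k := by omega
    have hkpow : k < 3 ^ k := Nat.lt_pow_self (by norm_num)
    have hfuel : k ≤ (end_ - start).natAbs + 1 := by omega
    rw [if_pos ⟨h1, h2⟩, hn, hend]
    rw [findA_eq k hk1 _ (by omega) start p hpN]
    have : start + (p:Int) - start = (p:Int) := by omega
    rw [this]
    have : start + (3:Int) ^ k - 1 - start + 1 = (3:Int) ^ k := by ring
    rw [this, findB_eq k p "" hpN, String.append_empty]
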